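-- pv_equiv track=rewrite | github.com/akash02302/PresentationAi | presentation-ai-backend/document_processor.py | _process_two_columns
-- ===== SOURCE A (Python) =====
-- def _process_two_columns(text: str) -> str:
--     lines = text.split('\n')
--     column1 = []
--     column2 = []
--     current_column = 1
--
--     for line in lines:
--         stripped = line.strip()
--         if not stripped:
--             continue
--         if (current_column == 1 and len(column1) > 0 and
--             (len(stripped) < 15 or stripped.isupper())):
--             current_column = 2
--         if current_column == 1:
--             column1.append(stripped)
--         else:
--             column2.append(stripped)
--
--     return '\n'.join(column1 + column2)
-- ===== SOURCE B (Python) =====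
-- def _process_two_columns(text: str) -> str:
--     # The two columns of A always hold, in order, exactly the non-empty stripped
--     # lines, and A returns their concatenation - so the split point is irrelevant.
--     return '\n'.join(s for line in text.split('\n') if (s := line.strip()))
-- ===== Notes on version B (the rewrite author's own statement) =====
-- stated objective: simpler
-- what changed: Dropped the two-list/column state machine entirely: since column1 ++ column2 is always just the non-empty stripped lines in order, B is a single filtering comprehension joined by newlines.
import Mathlib
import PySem

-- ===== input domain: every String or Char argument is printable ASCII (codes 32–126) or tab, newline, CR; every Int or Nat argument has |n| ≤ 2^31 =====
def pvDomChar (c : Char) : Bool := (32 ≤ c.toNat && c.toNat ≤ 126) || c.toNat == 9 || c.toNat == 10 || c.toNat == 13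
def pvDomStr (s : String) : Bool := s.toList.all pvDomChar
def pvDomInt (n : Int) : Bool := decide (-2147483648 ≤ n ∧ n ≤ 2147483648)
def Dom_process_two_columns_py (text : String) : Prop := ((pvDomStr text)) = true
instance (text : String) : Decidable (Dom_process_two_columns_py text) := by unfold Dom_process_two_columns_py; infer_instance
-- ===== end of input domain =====

-- B replaces A's two-list column state machine by one filtering pass (objective: simpler);
-- the output is the same because column1 ++ column2 is always the non-empty stripped lines in order.

-- ===== PORT A =====
-- str.isupper(): at least one cased character and no lowercase one; exact on ASCII (the domain).
def pvIsupper (s : String) : Bool :=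
  s.toList.any (fun c => PySem.Chars.isalpha c) && !(s.toList.any (fun c => PySem.Chars.islower c))

-- one iteration of A's for-loop over (column1, column2, current_column)
def twoColStep (st : List String × List String × Int) (line : String) :
    List String × List String × Int :=
  let stripped := PySem.Str.strip line
  if stripped = "" then st
  else
    let cur := if st.2.2 = 1 ∧ st.1.length > 0 ∧
                  (PySem.Str.len stripped < 15 ∨ pvIsupper stripped = true)
               then 2 else st.2.2
    if cur = 1 then (st.1 ++ [stripped], st.2.1, cur)
    else (st.1, st.2.1 ++ [stripped], cur)

def process_two_columns_py (text : String) : String :=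
  let lines := ((PySem.Str.split? text "\n").getD [])
  let r : List String × List String × Int := lines.foldl twoColStep ([], [], 1)
  PySem.Str.join "\n" (r.1 ++ r.2.1)

-- ===== PORT B =====
def process_two_columns_py_alt (text : String) : String :=
  PySem.Str.join "\n"
    ((((PySem.Str.split? text "\n").getD [])).filterMap (fun line =>
      let s := PySem.Str.strip line
      if s = "" then none else some s))

-- ===== PRECONDITION & SPEC =====
def Spec_process_two_columns_py (text : String) (out : String) : Prop := out = process_two_columns_py_alt text
instance (text : String) (out : String) : Decidable (Spec_process_two_columns_py text out) := by unfold Spec_process_two_columns_py; infer_instance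

-- ===== CLAIM (what is proved, stated in full; the proofs are below) =====
def Claim_equal_process_two_columns_py : Prop := ∀ (text : String), Dom_process_two_columns_py text → Spec_process_two_columns_py text (process_two_columns_py text)

-- ===== LEMMAS AND PROOFS =====

def pvFilt (lines : List String) : List String :=
  lines.filterMap (fun line =>
    let s := PySem.Str.strip line
    if s = "" then none else some s)

-- once current_column = 2, every kept line goes to column2
theorem twoCol_from_two (lines : List String) (c1 c2 : List String) :
    lines.foldl twoColStep (c1, c2, 2) = (c1, c2 ++ pvFilt lines, 2) := by
  induction lines generalizing c2 with
  | nil => simp [pvFilt]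
  | cons l ls ih =>
    simp only [List.foldl_cons, twoColStep, pvFilt, List.filterMap_cons]
    by_cases h : PySem.Str.strip l = ""
    · simp [h, ih, pvFilt]
    · simp [h, ih, pvFilt]

-- while current_column = 1 (and column2 empty), column1 ++ column2 collects the kept lines in order
theorem twoCol_from_one (lines : List String) (c1 : List String) :
    (lines.foldl twoColStep (c1, [], 1)).1 ++ (lines.foldl twoColStep (c1, [], 1)).2.1
      = c1 ++ pvFilt lines := by
  induction lines generalizing c1 with
  | nil => simp [pvFilt]
  | cons l ls ih =>
    simp only [List.foldl_cons, pvFilt, List.filterMap_cons]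
    by_cases h : PySem.Str.strip l = ""
    · simpa [twoColStep, h, pvFilt] using ih c1
    · by_cases hc : ((c1, ([] : List String), (1 : Int)) : List String × List String × Int).2.2 = 1 ∧
          ((c1, ([] : List String), (1 : Int)) : List String × List String × Int).1.length > 0 ∧
          (PySem.Str.len (PySem.Str.strip l) < 15 ∨ pvIsupper (PySem.Str.strip l) = true)
      · have hstep : twoColStep (c1, [], 1) l = (c1, [PySem.Str.strip l], 2) := by
          unfold twoColStep
          rw [if_neg h, if_pos hc, if_neg (by norm_num)]
          simp
        rw [hstep, twoCol_from_two]
        simp [if_neg h, pvFilt]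
      · have hstep : twoColStep (c1, [], 1) l = (c1 ++ [PySem.Str.strip l], [], 1) := by
          unfold twoColStep
          rw [if_neg h, if_neg hc, if_pos rfl]
        rw [hstep]
        simp only [if_neg h]
        simpa using ih (c1 ++ [PySem.Str.strip l])

-- ===== VERDICT (by name: the statement is the Claim_ definition above) =====
theorem process_two_columns_py_spec : Claim_equal_process_two_columns_py := by
  intro text _
  unfold Spec_process_two_columns_py process_two_columns_py process_two_columns_py_alt
  have h := twoCol_from_one (((PySem.Str.split? text "\n").getD [])) []
  simp only [List.nil_append] at h
  show PySem.Str.join "\n" _ = _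
  rw [h]
  simp [pvFilt]
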